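-- pv_equiv track=rewrite | github.com/cmharlow/BF2 | extract_bf_changes.py | compare_lists
-- ===== SOURCE A (Python) =====
-- def compare_lists(a, b):
--     """Compare lists, return counts of entries in both, a_only, b_only."""
--     both = 0
--     a_only = 0
--     b_only = 0
--     ab = set(a) | set(b)
--     for entry in ab:
--         if (entry in a):
--             if (entry in b):
--                 both += 1
--             else:
--                 a_only += 1
--         elif (entry in b):
--             b_only += 1
--     return(both, a_only, b_only)
-- ===== SOURCE B (Python) =====
-- def compare_lists(a, b):
--     """Compare lists, return counts of entries in both, a_only, b_only."""
--     sa = set(a)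
--     sb = set(b)
--     return (len(sa & sb), len(sa - sb), len(sb - sa))
-- ===== Notes on version B (the rewrite author's own statement) =====
-- stated objective: faster
-- what changed: Replaces the loop over the union set (with O(n) list-membership tests per element) by two set constructions and three direct set-algebra cardinalities (len of intersection and the two differences).
import Mathlib
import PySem

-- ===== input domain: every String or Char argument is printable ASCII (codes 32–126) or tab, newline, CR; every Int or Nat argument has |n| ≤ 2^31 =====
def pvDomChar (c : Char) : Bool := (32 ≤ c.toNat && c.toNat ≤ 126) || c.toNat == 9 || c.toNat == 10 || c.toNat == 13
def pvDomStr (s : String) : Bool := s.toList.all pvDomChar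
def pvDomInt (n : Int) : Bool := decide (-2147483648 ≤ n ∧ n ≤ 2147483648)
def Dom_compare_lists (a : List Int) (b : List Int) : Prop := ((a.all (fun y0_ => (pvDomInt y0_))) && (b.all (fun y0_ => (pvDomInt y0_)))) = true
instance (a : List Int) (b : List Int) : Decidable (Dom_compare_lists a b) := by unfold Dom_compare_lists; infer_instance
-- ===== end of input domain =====

-- B replaces A's loop over the union set with its per-element list-membership tests by three
-- direct set-algebra cardinalities (intersection and the two differences); objective: faster.
-- ===== PORT A =====
def compare_lists (a : List Int) (b : List Int) : List Int :=
  let ab := PySem.Set.union (PySem.Set.ofList a) (PySem.Set.ofList b)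
  let s := ab.foldl (fun (s : Int × Int × Int) entry =>
    if a.contains entry then
      if b.contains entry then (s.1 + 1, s.2.1, s.2.2)
      else (s.1, s.2.1 + 1, s.2.2)
    else if b.contains entry then (s.1, s.2.1, s.2.2 + 1)
    else s) ((0 : Int), (0 : Int), (0 : Int))
  [s.1, s.2.1, s.2.2]

-- ===== PORT B =====
def compare_lists_alt (a : List Int) (b : List Int) : List Int :=
  let sa := PySem.Set.ofList a
  let sb := PySem.Set.ofList b
  [(PySem.Set.len (PySem.Set.inter sa sb) : Int),
   (PySem.Set.len (PySem.Set.diff sa sb) : Int),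
   (PySem.Set.len (PySem.Set.diff sb sa) : Int)]

-- ===== PRECONDITION & SPEC =====
def Spec_compare_lists (a : List Int) (b : List Int) (out : List Int) : Prop := out = compare_lists_alt a b
instance (a : List Int) (b : List Int) (out : List Int) : Decidable (Spec_compare_lists a b out) := by unfold Spec_compare_lists; infer_instance

-- ===== CLAIM (what is proved, stated in full; the proofs are below) =====
def Claim_equal_compare_lists : Prop := ∀ (a : List Int) (b : List Int), Dom_compare_lists a b → Spec_compare_lists a b (compare_lists a b)

-- ===== LEMMAS AND PROOFS =====

-- A's classification loop, with arbitrary starting counters, adds one countP per branch.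
theorem pv_fold_counts (a b l : List Int) (x y z : Int) :
    l.foldl (fun (s : Int × Int × Int) entry =>
      if a.contains entry then
        if b.contains entry then (s.1 + 1, s.2.1, s.2.2)
        else (s.1, s.2.1 + 1, s.2.2)
      else if b.contains entry then (s.1, s.2.1, s.2.2 + 1)
      else s) (x, y, z)
    = (x + (l.countP (fun e => a.contains e && b.contains e) : Int),
       y + (l.countP (fun e => a.contains e && !b.contains e) : Int),
       z + (l.countP (fun e => !a.contains e && b.contains e) : Int)) := by
  induction l generalizing x y z with
  | nil => simp
  | cons e t ih =>
      simp only [List.foldl_cons, List.countP_cons]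
      by_cases ha : a.contains e = true <;> by_cases hb : b.contains e = true <;>
        simp only [ha, hb, if_true, if_false, Bool.and_true, Bool.and_false,
          Bool.not_true, Bool.not_false, Bool.false_eq_true] <;>
        rw [ih] <;> simp only [Prod.mk.injEq] <;> push_cast <;> omega

-- two Nodup lists with the same members have the same length
theorem pv_len_eq_of_nodup {l1 l2 : List Int} (h1 : l1.Nodup) (h2 : l2.Nodup)
    (h : ∀ x, x ∈ l1 ↔ x ∈ l2) : l1.length = l2.length :=
  ((List.perm_ext_iff_of_nodup h1 h2).2 h).length_eq

theorem pv_countP_union (a b : List Int) (p : Int → Bool) (target : List Int)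
    (htn : target.Nodup)
    (hmem : ∀ x, (x ∈ PySem.Set.union (PySem.Set.ofList a) (PySem.Set.ofList b) ∧ p x = true) ↔ x ∈ target) :
    (PySem.Set.union (PySem.Set.ofList a) (PySem.Set.ofList b)).countP p = target.length := by
  rw [List.countP_eq_length_filter]
  apply pv_len_eq_of_nodup
  · exact List.Nodup.filter _ (PySem.Set.nodup_union _ _ (PySem.Set.nodup_ofList a))
  · exact htn
  · intro x
    rw [List.mem_filter]
    exact hmem x

-- ===== VERDICT (by name: the statement is the Claim_ definition above) =====
theorem compare_lists_spec : Claim_equal_compare_lists := by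
  intro a b _
  unfold Spec_compare_lists compare_lists compare_lists_alt
  simp only []
  rw [pv_fold_counts]
  have hboth := pv_countP_union a b (fun e => a.contains e && b.contains e)
    (PySem.Set.inter (PySem.Set.ofList a) (PySem.Set.ofList b))
    (PySem.Set.nodup_inter _ _ (PySem.Set.nodup_ofList a))
    (by intro x
        simp [PySem.Set.mem_union, PySem.Set.mem_inter, PySem.Set.mem_ofList]
        tauto)
  have haonly := pv_countP_union a b (fun e => a.contains e && !b.contains e)
    (PySem.Set.diff (PySem.Set.ofList a) (PySem.Set.ofList b))
    (PySem.Set.nodup_diff _ _ (PySem.Set.nodup_ofList a))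
    (by intro x
        simp [PySem.Set.mem_union, PySem.Set.mem_diff, PySem.Set.mem_ofList]
        tauto)
  have hbonly := pv_countP_union a b (fun e => !a.contains e && b.contains e)
    (PySem.Set.diff (PySem.Set.ofList b) (PySem.Set.ofList a))
    (PySem.Set.nodup_diff _ _ (PySem.Set.nodup_ofList b))
    (by intro x
        simp [PySem.Set.mem_union, PySem.Set.mem_diff, PySem.Set.mem_ofList]
        tauto)
  simp only [List.contains_eq_mem] at hboth haonly hbonly
  simp [PySem.Set.len, hboth, haonly, hbonly]
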